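-- pv_equiv track=rewrite | github.com/raikoug/AoCv2 | python/aoc_solutions/2024/day_25.py | eval_lock
-- ===== SOURCE A (Python) =====
-- from typing import List, Tuple
--
-- def eval_lock(lines: List[str]) -> List[int]:
--     """
--     Converte la rappresentazione di un lucchetto in una lista di altezze per colonna.
--
--     Esempio (h = 7):
--
--         ##### 0
--         .#### 1
--         .#### 2
--         .#### 3
--         .#.#. 4
--         .#... 5
--         ..... 6
--
--     Il valore per ogni colonna è "quanti # sotto il bordo in alto".
--     """
--     h = len(lines)
--     w = len(lines[0])
--     res: List[int] = [0] * w
--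
--     for row, line in enumerate(lines):
--         for col, ch in enumerate(line):
--             if ch == "#":
--                 # distanza dall'alto (riga 0 in alto)
--                 res[col] = max(res[col], row)
--
--     return res
-- ===== SOURCE B (Python) =====
-- from typing import List
--
-- def eval_lock(lines: List[str]) -> List[int]:
--     h = len(lines)
--     w = len(lines[0])
--     res: List[int] = []
--     for col in range(w):
--         height = 0
--         for row in range(h - 1, -1, -1):
--             line = lines[row]
--             if col < len(line) and line[col] == "#":
--                 height = row
--                 break
--         res.append(height)
--     return res
-- ===== Notes on version B (the rewrite author's own statement) =====
-- stated objective: alternative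
-- what changed: B builds the result per column, scanning rows bottom-up and stopping at the first '#', instead of A's row-major full sweep accumulating a running max into a preallocated array.
import Mathlib
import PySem

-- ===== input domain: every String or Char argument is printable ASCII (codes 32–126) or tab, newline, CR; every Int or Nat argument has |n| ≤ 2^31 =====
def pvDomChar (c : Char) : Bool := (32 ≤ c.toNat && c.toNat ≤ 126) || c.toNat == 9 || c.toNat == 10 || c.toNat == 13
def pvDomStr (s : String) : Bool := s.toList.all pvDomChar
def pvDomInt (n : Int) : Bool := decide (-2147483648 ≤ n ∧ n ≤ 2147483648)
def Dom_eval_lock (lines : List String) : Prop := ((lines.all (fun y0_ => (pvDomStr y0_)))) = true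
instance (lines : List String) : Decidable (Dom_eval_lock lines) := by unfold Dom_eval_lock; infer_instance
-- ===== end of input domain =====

-- B builds the result per column (bottom-up scan stopping at the first '#') instead of A's
-- row-major sweep with a running max; same cost, different traversal (objective: alternative).

-- ===== PORT A =====
-- row-major sweep: res[col] = max(res[col], row) whenever line[col] == '#'.
-- lines[0] on [] raises IndexError (excluded by Pre_), ported as headD "";
-- res[col] with col ≥ w raises IndexError in Python (excluded by Pre_): here
-- List.set is a no-op and getD defaults, which Pre_ makes unreachable.
def eval_lock (lines : List String) : List Int :=
  let w := ((lines.headD "").toList).length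
  lines.zipIdx.foldl
    (fun res p =>
      p.1.toList.zipIdx.foldl
        (fun res q =>
          if q.1 = '#' then res.set q.2 (max (res.getD q.2 0) (p.2 : Int)) else res)
        res)
    (List.replicate w (0 : Int))

-- ===== PORT B =====
-- inner loop of B: for row in range(h-1, -1, -1): if col < len(line) and line[col] == '#': break.
-- cs[col]? = some '#' is exactly 'col < len(line) and line[col] == "#"'; rows are always in
-- range so lines.getD row "" is lines[row].
def scanCol (lines : List String) (col : Nat) : List Nat → Int
  | [] => 0
  | row :: rest =>
      if ((lines.getD row "").toList)[col]? = some '#' then (row : Int)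
      else scanCol lines col rest

def eval_lock_alt (lines : List String) : List Int :=
  let h := lines.length
  let w := ((lines.headD "").toList).length
  (List.range w).map (fun col => scanCol lines col ((List.range h).reverse))

-- ===== PRECONDITION & SPEC =====
-- Pre_ excludes exactly the inputs on which A raises IndexError: the empty list
-- (lines[0]) and inputs where some line carries a '#' at a column ≥ len(lines[0])
-- (the write res[col] is out of range there).
def Pre_eval_lock (lines : List String) : Prop :=
  lines ≠ [] ∧
    ∀ line ∈ lines, ((line.toList.drop ((lines.headD "").toList).length).all (· ≠ '#')) = true
instance (lines : List String) : Decidable (Pre_eval_lock lines) := by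
  unfold Pre_eval_lock; infer_instance

def pvWitness_eval_lock : List String := ["##.#", ".#..", "#..#"]

def Spec_eval_lock (lines : List String) (out : List Int) : Prop := out = eval_lock_alt lines
instance (lines : List String) (out : List Int) : Decidable (Spec_eval_lock lines out) := by unfold Spec_eval_lock; infer_instance

-- ===== CLAIM (what is proved, stated in full; the proofs are below) =====
def Claim_equal_eval_lock : Prop := ∀ (lines : List String), Dom_eval_lock lines → Pre_eval_lock lines → Spec_eval_lock lines (eval_lock lines)

-- ===== LEMMAS AND PROOFS =====

-- the running-max fold along a list of (line, row) pairs, as seen from one column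
def colFold (col : Nat) (v : Int) (ls : List (String × Nat)) : Int :=
  ls.foldl (fun acc p => if (p.1.toList)[col]? = some '#' then max acc (p.2 : Int) else acc) v

theorem inner_getElem? (r : Int) :
    ∀ (cs : List Char) (k : Nat) (res : List Int) (col : Nat),
    ((cs.zipIdx k).foldl
      (fun res q => if q.1 = '#' then res.set q.2 (max (res.getD q.2 0) r) else res) res)[col]?
    = if k ≤ col ∧ cs[col - k]? = some '#' then (res[col]?).map (fun v => max v r)
      else res[col]? := by
  intro cs
  induction cs with
  | nil => intro k res col; simp
  | cons c cs ih =>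
    intro k res col
    rw [List.zipIdx_cons, List.foldl_cons]
    rw [ih (k+1)]
    by_cases hck : col = k
    · subst hck
      have hL : ¬ (col + 1 ≤ col ∧ cs[col - (col + 1)]? = some '#') := fun h => by omega
      rw [if_neg hL]
      have hz : col - col = 0 := by omega
      by_cases hc : c = '#'
      · rw [if_pos hc, if_pos ⟨le_refl col, by simp [hc]⟩]
        rw [List.getElem?_set]
        by_cases hk : col < res.length
        · simp [hk, List.getD]
        · have hn : res[col]? = none := List.getElem?_eq_none_iff.mpr (Nat.le_of_not_lt hk)
          simp [hk]
      · rw [if_neg hc, if_neg (fun h => hc (by simpa [hz] using h.2))]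
    · have hset : ∀ (v : Int), (res.set k v)[col]? = res[col]? := by
        intro v; rw [List.getElem?_set]; simp [Ne.symm hck]
      by_cases hle : k ≤ col
      · have hlt : k + 1 ≤ col := by omega
        have hget : (c :: cs)[col - k]? = cs[col - (k + 1)]? := by
          rw [show col - k = (col - (k+1)) + 1 from by omega]; simp
        rw [hget]
        by_cases hc : c = '#'
        · simp [hc, hlt, hle, hset]
        · simp [hc, hlt, hle]
      · have h1 : ¬ (k + 1 ≤ col) := by omega
        by_cases hc : c = '#'
        · simp [hc, h1, hle, hset]
        · simp [hc, h1, hle]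

theorem outer_getElem? :
    ∀ (ls : List (String × Nat)) (res : List Int) (col : Nat),
    (ls.foldl (fun res p =>
        p.1.toList.zipIdx.foldl
          (fun res q => if q.1 = '#' then res.set q.2 (max (res.getD q.2 0) (p.2 : Int)) else res)
          res) res)[col]?
    = (res[col]?).map (fun v => colFold col v ls) := by
  intro ls
  induction ls with
  | nil => intro res col; simp [colFold]
  | cons p ls ih =>
    intro res col
    rw [List.foldl_cons, ih]
    rw [inner_getElem? (p.2 : Int) p.1.toList 0 res col]
    simp only [Nat.zero_le, true_and, Nat.sub_zero, colFold, List.foldl_cons]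
    by_cases hc : (p.1.toList)[col]? = some '#'
    · simp only [hc]
      cases res[col]? <;> simp
    · simp [hc]

theorem colFold_le (col : Nat) (b : Int) :
    ∀ (ls : List (String × Nat)) (v : Int), v ≤ b → (∀ p ∈ ls, (p.2 : Int) ≤ b) →
    colFold col v ls ≤ b := by
  intro ls
  induction ls with
  | nil => intro v hv _; simpa [colFold] using hv
  | cons p ls ih =>
    intro v hv hall
    simp only [colFold, List.foldl_cons]
    by_cases hc : (p.1.toList)[col]? = some '#'
    · rw [if_pos hc]
      exact ih _ (max_le hv (hall p (by simp))) (fun q hq => hall q (by simp [hq]))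
    · rw [if_neg hc]
      exact ih _ hv (fun q hq => hall q (by simp [hq]))

theorem colFold_append (col : Nat) (v : Int) (ls : List (String × Nat)) (p : String × Nat) :
    colFold col v (ls ++ [p])
    = if (p.1.toList)[col]? = some '#' then max (colFold col v ls) (p.2 : Int)
      else colFold col v ls := by
  simp [colFold, List.foldl_append]

theorem scanCol_congr (col : Nat) :
    ∀ (rows : List Nat) (l1 l2 : List String),
    (∀ row ∈ rows, l1.getD row "" = l2.getD row "") →
    scanCol l1 col rows = scanCol l2 col rows := by
  intro rows
  induction rows with
  | nil => intro _ _ _; simp [scanCol]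
  | cons row rest ih =>
    intro l1 l2 h
    simp only [scanCol]
    rw [h row (by simp), ih l1 l2 (fun r hr => h r (by simp [hr]))]

theorem colFold_eq_scan (col : Nat) :
    ∀ (lines : List String),
    colFold col 0 lines.zipIdx = scanCol lines col ((List.range lines.length).reverse) := by
  intro lines
  induction lines using List.reverseRecOn with
  | nil => simp [colFold, scanCol]
  | append_singleton l a ih =>
    rw [List.zipIdx_append]
    simp only [List.length_append, List.length_singleton]
    rw [List.range_succ, List.reverse_append]
    simp only [List.reverse_singleton, List.singleton_append, scanCol]
    have hget : (l ++ [a]).getD l.length "" = a := by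
      simp [List.getD]
    have hcongr : scanCol (l ++ [a]) col (List.range l.length).reverse
        = scanCol l col (List.range l.length).reverse := by
      apply scanCol_congr
      intro row hrow
      have : row < l.length := List.mem_range.mp (List.mem_reverse.mp hrow)
      simp [List.getD, List.getElem?_append_left this]
    rw [hget, hcongr, ← ih]
    rw [show (List.zipIdx [a] (0 + l.length)) = [(a, l.length)] from by simp [List.zipIdx]]
    rw [colFold_append]
    by_cases hc : (a.toList)[col]? = some '#'
    · rw [if_pos hc, if_pos hc]
      have hle : colFold col 0 l.zipIdx ≤ (l.length : Int) := by
        apply colFold_le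
        · exact Int.natCast_nonneg _
        · intro p hp
          have := List.snd_lt_add_of_mem_zipIdx hp
          simp only [Nat.zero_add] at this
          exact_mod_cast Nat.le_of_lt this
      rw [max_eq_right hle]
    · rw [if_neg hc, if_neg hc]

theorem eval_lock_getElem? (lines : List String) (col : Nat) :
    (eval_lock lines)[col]? =
    ((List.replicate ((lines.headD "").toList).length (0 : Int))[col]?).map
      (fun v => colFold col v lines.zipIdx) := by
  unfold eval_lock
  exact outer_getElem? lines.zipIdx _ col

-- ===== VERDICT (by name: the statement is the Claim_ definition above) =====
theorem eval_lock_spec : Claim_equal_eval_lock := by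
  intro lines _ _
  unfold Spec_eval_lock
  apply List.ext_getElem?
  intro col
  rw [eval_lock_getElem?]
  unfold eval_lock_alt
  by_cases hcw : col < ((lines.headD "").toList).length
  · rw [List.getElem?_map, List.getElem?_range hcw]
    rw [List.getElem?_replicate_of_lt hcw]
    simp only [Option.map_some]
    rw [colFold_eq_scan]
  · rw [List.getElem?_eq_none_iff.mpr (by simpa using hcw),
        List.getElem?_eq_none_iff.mpr (by simpa using hcw)]
    simp
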